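-- pv_equiv track=rewrite | github.com/xpc123/agenic_chatBot | backend/app/core/planner.py | should_use_planning
-- ===== SOURCE A (Python) =====
-- def should_use_planning(message: str) -> bool:
--     """
--     判断是否需要规划
--
--     使用多维度评估：
--     1. 任务复杂度关键词
--     2. 消息长度
--     3. 多任务指示词
--     4. 工具调用暗示
--
--     简单问题直接回答，复杂问题才规划
--     """
--     message_lower = message.lower()
--
--     # 1. 明确的多步骤任务关键词
--     multi_step_keywords = [
--         "首先", "然后", "接着", "最后", "第一步", "第二步",
--         "first", "then", "next", "finally", "step 1", "step 2",
--         "1.", "2.", "1)", "2)",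
--     ]
--     if any(keyword in message_lower for keyword in multi_step_keywords):
--         return True
--
--     # 2. 复杂任务指示词
--     complex_keywords = [
--         "帮我", "分析", "比较", "总结", "调研", "评估",
--         "设计", "规划", "制定", "整理", "梳理", "汇总",
--         "analyze", "compare", "summarize", "research", "evaluate",
--         "design", "plan", "organize", "compile",
--     ]
--     complex_count = sum(1 for kw in complex_keywords if kw in message_lower)
--     if complex_count >= 2:
--         return True
--
--     # 3. 多任务指示词
--     multi_task_keywords = [
--         "多个", "几个", "所有", "各个", "每个", "批量",
--         "multiple", "several", "all", "each", "batch",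
--         "和", "以及", "同时", "另外", "还要",
--         "and also", "as well as", "in addition",
--     ]
--     if any(keyword in message_lower for keyword in multi_task_keywords):
--         if len(message) > 50:  # 结合消息长度判断
--             return True
--
--     # 4. 消息很长，可能包含复杂需求
--     if len(message) > 200:
--         return True
--
--     # 5. 包含文件路径或代码相关操作
--     code_keywords = [
--         "@", "文件", "代码", "函数", "类", "模块",
--         "file", "code", "function", "class", "module",
--         "重构", "优化", "修复", "实现", "创建",
--         "refactor", "optimize", "fix", "implement", "create",
--     ]
--     code_count = sum(1 for kw in code_keywords if kw in message_lower)
--     if code_count >= 2: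
--         return True
--
--     return False
-- ===== SOURCE B (Python) =====
-- MULTI_STEP = [
--     "首先", "然后", "接着", "最后", "第一步", "第二步",
--     "first", "then", "next", "finally", "step 1", "step 2",
--     "1.", "2.", "1)", "2)",
-- ]
-- COMPLEX = [
--     "帮我", "分析", "比较", "总结", "调研", "评估",
--     "设计", "规划", "制定", "整理", "梳理", "汇总",
--     "analyze", "compare", "summarize", "research", "evaluate",
--     "design", "plan", "organize", "compile",
-- ]
-- MULTI_TASK = [
--     "多个", "几个", "所有", "各个", "每个", "批量",
--     "multiple", "several", "all", "each", "batch",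
--     "和", "以及", "同时", "另外", "还要",
--     "and also", "as well as", "in addition",
-- ]
-- CODE = [
--     "@", "文件", "代码", "函数", "类", "模块",
--     "file", "code", "function", "class", "module",
--     "重构", "优化", "修复", "实现", "创建",
--     "refactor", "optimize", "fix", "implement", "create",
-- ]
--
--
-- def _hits(keywords, lower):
--     """Explicit multi-pattern scan: index the (non-empty) keywords by first
--     character, then walk every start offset of `lower` once, collecting the
--     set of distinct keywords that match there."""
--     index = {}
--     for kw in keywords:
--         index.setdefault(kw[0], []).append(kw)
--     found = set()
--     for i, ch in enumerate(lower):
--         for kw in index.get(ch, []):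
--             if lower.startswith(kw, i):
--                 found.add(kw)
--     return len(found)
--
--
-- def should_use_planning(message: str) -> bool:
--     lower = message.lower()
--     n = len(message)
--     return (_hits(MULTI_STEP, lower) >= 1
--             or _hits(COMPLEX, lower) >= 2
--             or (_hits(MULTI_TASK, lower) >= 1 and n > 50)
--             or n > 200
--             or _hits(CODE, lower) >= 2)
-- ===== Notes on version B (the rewrite author's own statement) =====
-- stated objective: alternative
-- what changed: Replaces A's per-keyword built-in substring membership tests with five early-return branches by an explicit multi-pattern matcher: one scan over every start offset of the lowered message collecting the set of distinct keywords matching at each offset per group, then a single boolean formula over the four hit counts.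
import Mathlib
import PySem

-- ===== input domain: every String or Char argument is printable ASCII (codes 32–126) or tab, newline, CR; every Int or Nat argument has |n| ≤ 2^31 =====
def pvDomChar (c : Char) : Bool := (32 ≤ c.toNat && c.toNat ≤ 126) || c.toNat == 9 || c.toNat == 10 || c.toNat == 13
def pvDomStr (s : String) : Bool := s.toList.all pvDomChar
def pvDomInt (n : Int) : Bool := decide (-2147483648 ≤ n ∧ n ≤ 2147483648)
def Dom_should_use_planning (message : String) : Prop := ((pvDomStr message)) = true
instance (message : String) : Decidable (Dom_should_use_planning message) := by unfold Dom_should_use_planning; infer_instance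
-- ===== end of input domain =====

-- B replaces A's per-keyword built-in substring tests and sequential early returns by an
-- explicit multi-pattern scan: keywords indexed by first character, one walk over the start
-- offsets collecting distinct matches per group, then one boolean formula; objective: alternative.

-- ===== PORT A =====
def should_use_planning (message : String) : Bool :=
  let message_lower := PySem.Str.lower message
  let multi_step_keywords : List String :=
    ["首先", "然后", "接着", "最后", "第一步", "第二步",
     "first", "then", "next", "finally", "step 1", "step 2",
     "1.", "2.", "1)", "2)"]
  if multi_step_keywords.any (fun kw => PySem.Str.isIn kw message_lower) then true
  else
    let complex_keywords : List String :=
      ["帮我", "分析", "比较", "总结", "调研", "评估",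
       "设计", "规划", "制定", "整理", "梳理", "汇总",
       "analyze", "compare", "summarize", "research", "evaluate",
       "design", "plan", "organize", "compile"]
    let complex_count := complex_keywords.countP (fun kw => PySem.Str.isIn kw message_lower)
    if complex_count ≥ 2 then true
    else
      let multi_task_keywords : List String :=
        ["多个", "几个", "所有", "各个", "每个", "批量",
         "multiple", "several", "all", "each", "batch",
         "和", "以及", "同时", "另外", "还要",
         "and also", "as well as", "in addition"]
      if multi_task_keywords.any (fun kw => PySem.Str.isIn kw message_lower)
         && PySem.Str.len message > 50 then true
      else if PySem.Str.len message > 200 then true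
      else
        let code_keywords : List String :=
          ["@", "文件", "代码", "函数", "类", "模块",
           "file", "code", "function", "class", "module",
           "重构", "优化", "修复", "实现", "创建",
           "refactor", "optimize", "fix", "implement", "create"]
        let code_count := code_keywords.countP (fun kw => PySem.Str.isIn kw message_lower)
        if code_count ≥ 2 then true
        else false

-- ===== PORT B =====
def pvMultiStep : List String :=
  ["首先", "然后", "接着", "最后", "第一步", "第二步",
   "first", "then", "next", "finally", "step 1", "step 2",
   "1.", "2.", "1)", "2)"]
def pvComplex : List String :=
  ["帮我", "分析", "比较", "总结", "调研", "评估",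
   "设计", "规划", "制定", "整理", "梳理", "汇总",
   "analyze", "compare", "summarize", "research", "evaluate",
   "design", "plan", "organize", "compile"]
def pvMultiTask : List String :=
  ["多个", "几个", "所有", "各个", "每个", "批量",
   "multiple", "several", "all", "each", "batch",
   "和", "以及", "同时", "另外", "还要",
   "and also", "as well as", "in addition"]
def pvCode : List String :=
  ["@", "文件", "代码", "函数", "类", "模块",
   "file", "code", "function", "class", "module",
   "重构", "优化", "修复", "实现", "创建",
   "refactor", "optimize", "fix", "implement", "create"]

-- hand-ports inside pvHits: `kw[0]` is `kw.toList.headD ' '` (exact for the non-empty keyword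
-- lists this helper is used with; Python would raise on ""), and `lower.startswith(kw, i)` for
-- the non-negative offsets produced by enumerate is the prefix test on the drop.
def pvHits (keywords : List String) (lower : String) : Int :=
  let index : PySem.Dict Char (List String) :=
    keywords.foldl
      (fun d kw => d.modify (kw.toList.headD ' ') [] (fun l => l ++ [kw]))
      PySem.Dict.empty
  PySem.Set.len
    ((PySem.List.enumerate lower.toList 0).foldl
      (fun (found : PySem.Set String) p =>
        (index.getD p.2 []).foldl
          (fun found kw =>
            if PySem.Chars.startswith (lower.toList.drop p.1.toNat) kw.toList
            then PySem.Set.add found kw else found)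
          found)
      PySem.Set.empty)

def should_use_planning_alt (message : String) : Bool :=
  let lower := PySem.Str.lower message
  let n := PySem.Str.len message
  decide (pvHits pvMultiStep lower ≥ 1)
  || decide (pvHits pvComplex lower ≥ 2)
  || (decide (pvHits pvMultiTask lower ≥ 1) && decide (n > 50))
  || decide (n > 200)
  || decide (pvHits pvCode lower ≥ 2)

-- ===== PRECONDITION & SPEC =====
def Spec_should_use_planning (message : String) (out : Bool) : Prop := out = should_use_planning_alt message
instance (message : String) (out : Bool) : Decidable (Spec_should_use_planning message out) := by unfold Spec_should_use_planning; infer_instance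

-- ===== CLAIM (what is proved, stated in full; the proofs are below) =====
def Claim_equal_should_use_planning : Prop := ∀ (message : String), Dom_should_use_planning message → Spec_should_use_planning message (should_use_planning message)

-- ===== LEMMAS AND PROOFS =====

-- membership in the inner keyword loop's accumulated set
theorem pv_mem_inner (c : String → Bool) (kws : List String) (S : PySem.Set String) (x : String) :
    x ∈ kws.foldl (fun f kw => if c kw then PySem.Set.add f kw else f) S
      ↔ x ∈ S ∨ (x ∈ kws ∧ c x = true) := by
  induction kws generalizing S with
  | nil => simp
  | cons k t ih =>
    simp only [List.foldl_cons, ih, List.mem_cons]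
    by_cases h : c k = true
    · simp [h, PySem.Set.mem_add]
      constructor
      · rintro ((hS | rfl) | ht) <;> tauto
      · rintro (hS | ⟨(rfl | hx), hc⟩) <;> tauto
    · simp only [h]
      simp only [Bool.not_eq_true] at h
      constructor
      · rintro (hS | ht) <;> tauto
      · rintro (hS | ⟨(rfl | hx), hc⟩)
        · tauto
        · rw [hc] at h; cases h
        · tauto

-- the inner loop preserves Nodup
theorem pv_nodup_inner (c : String → Bool) (kws : List String) (S : PySem.Set String)
    (h : S.Nodup) :
    (kws.foldl (fun f kw => if c kw then PySem.Set.add f kw else f) S).Nodup := by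
  induction kws generalizing S with
  | nil => exact h
  | cons k t ih =>
    simp only [List.foldl_cons]
    apply ih
    split
    · exact PySem.Set.nodup_add _ _ h
    · exact h

-- the first-character index maps c to exactly the keywords whose first character is c
theorem pv_mem_index (hd : String → Char) (kws : List String) (c : Char) (x : String) :
    x ∈ (kws.foldl (fun d kw => d.modify (hd kw) [] (fun l => l ++ [kw]))
          PySem.Dict.empty).getD c []
      ↔ x ∈ kws ∧ hd x = c := by
  induction kws using List.reverseRecOn with
  | nil => simp [PySem.Dict.getD_empty]
  | append_singleton t k ih =>
    rw [List.foldl_append]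
    simp only [List.foldl_cons, List.foldl_nil, PySem.Dict.getD_modify, List.mem_append,
      List.mem_singleton]
    by_cases hc : c = hd k
    · subst hc
      rw [if_pos rfl]
      simp only [List.mem_append, List.mem_singleton, ih]
      constructor
      · rintro (⟨hx, hh⟩ | rfl)
        · exact ⟨Or.inl hx, hh⟩
        · exact ⟨Or.inr rfl, rfl⟩
      · rintro ⟨hx | rfl, hh⟩
        · exact Or.inl ⟨hx, hh⟩
        · exact Or.inr rfl
    · rw [if_neg hc, ih]
      constructor
      · rintro ⟨hx, hh⟩; exact ⟨Or.inl hx, hh⟩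
      · rintro ⟨hx | rfl, hh⟩
        · exact ⟨hx, hh⟩
        · exact absurd hh.symm hc

-- membership in the outer offset loop's accumulated set
theorem pv_mem_outer (idx : Char → List String) (c : Int → String → Bool)
    (l : List (Int × Char)) (S : PySem.Set String) (x : String) :
    x ∈ l.foldl
        (fun f p => (idx p.2).foldl (fun f kw => if c p.1 kw then PySem.Set.add f kw else f) f) S
      ↔ x ∈ S ∨ ∃ p ∈ l, x ∈ idx p.2 ∧ c p.1 x = true := by
  induction l generalizing S with
  | nil => simp
  | cons j t ih =>
    simp only [List.foldl_cons, ih, pv_mem_inner, List.mem_cons]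
    constructor
    · rintro ((hS | ⟨hk, hc⟩) | ⟨p, hp, hm, hc⟩)
      · tauto
      · exact Or.inr ⟨j, Or.inl rfl, hk, hc⟩
      · exact Or.inr ⟨p, Or.inr hp, hm, hc⟩
    · rintro (hS | ⟨p, (rfl | hp), hm, hc⟩) <;> tauto

-- the outer loop preserves Nodup
theorem pv_nodup_outer (idx : Char → List String) (c : Int → String → Bool)
    (l : List (Int × Char)) (S : PySem.Set String) (h : S.Nodup) :
    (l.foldl
        (fun f p => (idx p.2).foldl (fun f kw => if c p.1 kw then PySem.Set.add f kw else f) f)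
        S).Nodup := by
  induction l generalizing S with
  | nil => exact h
  | cons j t ih => exact ih _ (pv_nodup_inner _ _ _ h)

-- a non-empty kw matches at some enumerated offset (with the right first character)  ↔  kw is a substring
theorem pv_exists_offset_iff (L : List Char) (kw : List Char) (hne : kw ≠ []) :
    (∃ p ∈ PySem.List.enumerate L 0,
        kw.headD ' ' = p.2 ∧ PySem.Chars.startswith (L.drop p.1.toNat) kw = true)
      ↔ PySem.Chars.isIn kw L = true := by
  rw [← PySem.Chars.exists_prefix_drop_iff_isIn]
  constructor
  · rintro ⟨p, _, _, hs⟩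
    exact ⟨p.1.toNat, (PySem.Chars.startswith_iff _ _).mp hs⟩
  · rintro ⟨j, hp⟩
    obtain ⟨a, t, rfl⟩ := List.exists_cons_of_ne_nil hne
    have hj : j < L.length := by
      by_contra hle
      have : L.drop j = [] := List.drop_eq_nil_of_le (by omega)
      rw [this] at hp
      exact absurd (List.prefix_nil.mp hp) (by simp)
    have hdrop : L.drop j = L[j] :: L.drop (j + 1) := List.drop_eq_getElem_cons hj
    have hhead : a = L[j] := by
      obtain ⟨r, hr⟩ := hp
      rw [hdrop] at hr
      exact (List.cons.injEq _ _ _ _).mp hr |>.1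
    refine ⟨((j : Int), L[j]), ?_, by simpa using hhead, ?_⟩
    · rw [PySem.List.mem_enumerate_iff]
      exact ⟨j, hj, by simp⟩
    · rw [PySem.Chars.startswith_iff]
      simpa using hp

-- pvHits counts exactly the distinct keywords occurring as substrings of `lower`
theorem pvHits_eq (kws : List String) (lower : String) (hnd : kws.Nodup)
    (hne : ∀ kw ∈ kws, kw.toList ≠ []) :
    pvHits kws lower = (kws.countP (fun kw => PySem.Chars.isIn kw.toList lower.toList) : Int) := by
  unfold pvHits
  set L := lower.toList with hL
  set p : String → Bool := fun kw => PySem.Chars.isIn kw.toList L with hp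
  set index := kws.foldl
      (fun d kw => d.modify (kw.toList.headD ' ') [] (fun l => l ++ [kw]))
      PySem.Dict.empty with hindex
  set final := (PySem.List.enumerate L 0).foldl
      (fun (found : PySem.Set String) q =>
        (index.getD q.2 []).foldl
          (fun found kw =>
            if PySem.Chars.startswith (L.drop q.1.toNat) kw.toList
            then PySem.Set.add found kw else found)
          found)
      PySem.Set.empty with hfinal
  have hmem : ∀ x, x ∈ final ↔ x ∈ kws.filter p := by
    intro x
    rw [hfinal,
      pv_mem_outer (fun c => index.getD c []) (fun i kw => PySem.Chars.startswith (L.drop i.toNat) kw.toList)]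
    rw [List.mem_filter]
    simp only [PySem.Set.empty, List.not_mem_nil, false_or, hindex, pv_mem_index]
    constructor
    · rintro ⟨q, hq, ⟨hk, hh⟩, hs⟩
      exact ⟨hk, (pv_exists_offset_iff L x.toList (hne x hk)).mp ⟨q, hq, hh, hs⟩⟩
    · rintro ⟨hk, hin⟩
      obtain ⟨q, hq, hh, hs⟩ := (pv_exists_offset_iff L x.toList (hne x hk)).mpr hin
      exact ⟨q, hq, ⟨hk, hh⟩, hs⟩
  have hnodup : final.Nodup := by
    rw [hfinal]
    exact pv_nodup_outer (fun c => index.getD c [])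
      (fun i kw => PySem.Chars.startswith (L.drop i.toNat) kw.toList) _ _ List.nodup_nil
  have hperm : final.Perm (kws.filter p) :=
    (List.perm_ext_iff_of_nodup hnodup (hnd.filter p)).mpr hmem
  rw [List.countP_eq_length_filter, ← hperm.length_eq]
  rfl

-- `any p` is the same test as `countP p ≥ 1`
theorem pv_any_eq_countP {α : Type} (l : List α) (p : α → Bool) :
    l.any p = decide (1 ≤ l.countP p) := by
  rw [Bool.eq_iff_iff, List.any_eq_true, decide_eq_true_eq]
  exact List.countP_pos_iff.symm

-- ===== VERDICT (by name: the statement is the Claim_ definition above) =====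
theorem should_use_planning_spec : Claim_equal_should_use_planning := by
  intro message _
  unfold Spec_should_use_planning
  symm
  simp only [should_use_planning, should_use_planning_alt]
  rw [pvHits_eq _ _ (by decide) (by decide), pvHits_eq _ _ (by decide) (by decide),
      pvHits_eq _ _ (by decide) (by decide), pvHits_eq _ _ (by decide) (by decide)]
  simp only [pvMultiStep, pvComplex, pvMultiTask, pvCode, pv_any_eq_countP, PySem.Str.isIn_eq,
    PySem.Str.lower]
  rw [Bool.eq_iff_iff]
  simp only [Bool.or_eq_true, Bool.and_eq_true, decide_eq_true_eq, Bool.if_true_left,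
    Bool.false_eq_true, or_false, Nat.one_le_cast, Nat.ofNat_le_cast]
  omega
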